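-- pv_equiv track=rewrite | github.com/apaslak/advent-of-code | 2023/puzzle_11/part_2.py | identify_expansions
-- ===== SOURCE A (Python) =====
-- def rotate_map_clockwise(map):
--     new_map = []
--     num_rows, num_cols = len(map), len(map[0])
--     for i in range(num_cols):
--         j = num_rows-1
--         col = []
--         while j >= 0:
--             col.append(map[j][i])
--             j -= 1
--         new_map.append(col)
--     return new_map
--
-- def identify_expansions(map):
--     row_expansions = []
--     for i, row in enumerate(map):
--         if len(set(row)) == 1:
--             row_expansions.append(i)
--
--     map = rotate_map_clockwise(map)
--
--     col_expansions = []
--     for i, row in enumerate(map):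
--         if len(set(row)) == 1:
--             col_expansions.append(i)
--
--     return row_expansions, col_expansions
-- ===== SOURCE B (Python) =====
-- def identify_expansions(map):
--     num_cols = len(map[0])
--     first = map[0]
--     uniform = [True] * num_cols
--     row_expansions = []
--     for i, row in enumerate(map):
--         if row and row.count(row[0]) == len(row):
--             row_expansions.append(i)
--         for j in range(num_cols):
--             if row[j] != first[j]:
--                 uniform[j] = False
--     col_expansions = [j for j in range(num_cols) if uniform[j]]
--     return row_expansions, col_expansions
-- ===== Notes on version B (the rewrite author's own statement) =====
-- stated objective: alternative
-- what changed: B replaces A's rotate-the-grid-then-rescan (materializing a transposed copy and set()-scanning its rows) with a single interleaved pass over the rows that tests row uniformity via count() and maintains per-column uniformity flags against the first row, then reads off the uniform column indices. (no rotated copy is allocated and no per-row set() is built, a constant-factor win)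
import Mathlib
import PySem

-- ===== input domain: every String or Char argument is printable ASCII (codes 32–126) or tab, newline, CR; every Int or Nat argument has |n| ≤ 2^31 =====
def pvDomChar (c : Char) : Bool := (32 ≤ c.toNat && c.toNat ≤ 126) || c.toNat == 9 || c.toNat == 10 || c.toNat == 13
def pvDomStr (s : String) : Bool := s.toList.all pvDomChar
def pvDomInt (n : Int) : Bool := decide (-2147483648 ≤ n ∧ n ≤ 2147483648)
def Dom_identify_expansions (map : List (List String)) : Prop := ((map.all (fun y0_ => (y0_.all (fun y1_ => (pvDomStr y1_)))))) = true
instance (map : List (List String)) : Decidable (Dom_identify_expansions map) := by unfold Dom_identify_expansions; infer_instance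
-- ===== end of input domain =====

-- B replaces A's rotate-then-rescan with a single interleaved pass that checks row
-- uniformity and maintains per-column uniformity flags (objective: alternative decomposition).

-- ===== PORT A =====
def rotate_map_clockwise (m : List (List String)) : List (List String) :=
  let num_rows := m.length
  let num_cols := (m.headD []).length
  -- the while loop walks j from num_rows-1 down to 0 appending m[j][i]
  (List.range num_cols).map (fun i =>
    ((List.range num_rows).reverse).map (fun j => (m.getD j []).getD i ""))

def identify_expansions (map : List (List String)) : List Int × List Int :=
  let row_expansions := (PySem.List.enumerate map 0).foldl
    (fun acc p => if (PySem.Set.ofList p.2).length == 1 then acc ++ [p.1] else acc) []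
  let map2 := rotate_map_clockwise map
  let col_expansions := (PySem.List.enumerate map2 0).foldl
    (fun acc p => if (PySem.Set.ofList p.2).length == 1 then acc ++ [p.1] else acc) []
  (row_expansions, col_expansions)

-- ===== PORT B =====
def identify_expansions_alt (map : List (List String)) : List Int × List Int :=
  let num_cols := (map.headD []).length
  let first := map.headD []
  let st := (PySem.List.enumerate map 0).foldl
    (fun (st : List Int × List Bool) p =>
      ((if !p.2.isEmpty && (p.2.count (p.2.headD "") == p.2.length) then st.1 ++ [p.1] else st.1),
       (List.range num_cols).map (fun j => st.2.getD j true && (p.2.getD j "" == first.getD j ""))))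
    ([], List.replicate num_cols true)
  (st.1, ((List.range num_cols).filter (fun j => st.2.getD j true)).map (fun j => Int.ofNat j))

-- ===== PRECONDITION & SPEC =====
-- Pre_ excludes exactly the inputs on which Python A raises IndexError: the empty grid
-- (map[0]) and ragged grids with a row shorter than row 0 (map[j][i] out of range).
def Pre_identify_expansions (map : List (List String)) : Prop :=
  map ≠ [] ∧ ∀ r ∈ map, (map.headD []).length ≤ r.length
instance (map : List (List String)) : Decidable (Pre_identify_expansions map) := by
  unfold Pre_identify_expansions; infer_instance
def pvWitness_identify_expansions : List (List String) := [["a", "b"], ["a", "c"]]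
def Spec_identify_expansions (map : List (List String)) (out : List Int × List Int) : Prop := out = identify_expansions_alt map
instance (map : List (List String)) (out : List Int × List Int) : Decidable (Spec_identify_expansions map out) := by unfold Spec_identify_expansions; infer_instance

-- ===== CLAIM (what is proved, stated in full; the proofs are below) =====
def Claim_equal_identify_expansions : Prop := ∀ (map : List (List String)), Dom_identify_expansions map → Pre_identify_expansions map → Spec_identify_expansions map (identify_expansions map)

-- ===== LEMMAS AND PROOFS =====

-- all elements of the list are equal, and there is at least one
def pvAllSame (l : List String) : Prop := l ≠ [] ∧ ∀ x ∈ l, ∀ y ∈ l, x = y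

lemma pvHeadD_mem {α : Type} (l : List α) (d : α) (h : l ≠ []) : l.headD d ∈ l := by
  cases l with
  | nil => exact absurd rfl h
  | cons a t => simp

lemma pvCondA_iff (l : List String) :
    (((PySem.Set.ofList l).length == 1) = true) ↔ pvAllSame l := by
  rw [beq_iff_eq, List.length_eq_one_iff]
  constructor
  · rintro ⟨a, ha⟩
    have hmem : ∀ x ∈ l, x = a := by
      intro x hx
      have : x ∈ PySem.Set.ofList l := (PySem.Set.mem_ofList _ _).2 hx
      rw [ha] at this; simpa using this
    have haa : a ∈ l := by
      have : a ∈ PySem.Set.ofList l := by rw [ha]; simp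
      exact (PySem.Set.mem_ofList _ _).1 this
    refine ⟨by rintro rfl; simp at haa, ?_⟩
    intro x hx y hy; rw [hmem x hx, hmem y hy]
  · rintro ⟨hne, hall⟩
    have hnd := PySem.Set.nodup_ofList (xs := l)
    have hh : l.headD "" ∈ PySem.Set.ofList l :=
      (PySem.Set.mem_ofList _ _).2 (pvHeadD_mem l "" hne)
    cases hS : PySem.Set.ofList l with
    | nil => rw [hS] at hh; simp at hh
    | cons a t =>
      refine ⟨a, ?_⟩
      cases t with
      | nil => rfl
      | cons b t' =>
        exfalso
        rw [hS] at hnd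
        have ha : a ∈ l := (PySem.Set.mem_ofList _ _).1 (by rw [hS]; simp)
        have hb : b ∈ l := (PySem.Set.mem_ofList _ _).1 (by rw [hS]; simp)
        have : a = b := hall a ha b hb
        simp [this] at hnd

lemma pvCondB_iff (l : List String) :
    ((!l.isEmpty && (l.count (l.headD "") == l.length)) = true) ↔ pvAllSame l := by
  rw [Bool.and_eq_true, beq_iff_eq, List.count_eq_length]
  constructor
  · rintro ⟨hne, hall⟩
    have hne' : l ≠ [] := by simpa [List.isEmpty_iff] using hne
    refine ⟨hne', ?_⟩
    intro x hx y hy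
    rw [← hall x hx, ← hall y hy]
  · rintro ⟨hne, hall⟩
    refine ⟨by simpa [List.isEmpty_iff] using hne, ?_⟩
    intro b hb
    exact hall (l.headD "") (pvHeadD_mem l "" hne) b hb

lemma pvCondA_eq_condB (l : List String) :
    ((PySem.Set.ofList l).length == 1) = (!l.isEmpty && (l.count (l.headD "") == l.length)) :=
  Bool.coe_iff_coe.mp (by rw [pvCondA_iff, pvCondB_iff])

lemma pvFoldlPair {α β γ : Type} (f : β → α → β) (g : γ → α → γ) (l : List α) (b : β) (c : γ) :
    l.foldl (fun st p => (f st.1 p, g st.2 p)) (b, c) = (l.foldl f b, l.foldl g c) := by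
  induction l generalizing b c with
  | nil => rfl
  | cons x t ih => simpa using ih (f b x) (g c x)

lemma pvRowsSpec (L : List (List String)) (q : List String → Bool) :
    (PySem.List.enumerate L 0).foldl
      (fun acc p => if q p.2 then acc ++ [p.1] else acc) ([] : List Int)
      = (L.zipIdx.filter (fun p => q p.1)).map (fun p => ((p.2 : Nat) : Int)) := by
  rw [PySem.List.enumerate_eq_zipIdx_map, List.foldl_map]
  simpa using PySem.List.foldl_append_if (fun p : List String × Nat => q p.1)
    (fun p : List String × Nat => ((p.2 : Nat) : Int)) L.zipIdx []

lemma pvZipSelf {α : Type} (l : List α) : l.zip l = l.map (fun a => (a, a)) := by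
  induction l with
  | nil => rfl
  | cons x t ih => simpa using ih

lemma pvZipIdxMapRange {α : Type} (c : Nat) (g : Nat → α) :
    ((List.range c).map g).zipIdx = (List.range c).map (fun i => (g i, i)) := by
  rw [List.zipIdx_map, List.zipIdx_eq_zip_range', List.length_range, ← List.range_eq_range',
    pvZipSelf, List.map_map]
  rfl

lemma pvUnifInv (c : Nat) (first : List String) (L : List (Int × List String))
    (u : List Bool) (j : Nat) (hj : j < c) :
    (L.foldl (fun st p =>
        (List.range c).map (fun k => st.getD k true && (p.2.getD k "" == first.getD k ""))) u).getD j true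
      = (u.getD j true && L.all (fun p => p.2.getD j "" == first.getD j "")) := by
  induction L generalizing u with
  | nil => simp
  | cons x t ih =>
    simp only [List.foldl_cons, List.all_cons]
    rw [ih, PySem.List.getD_map_range _ _ _ _ hj, Bool.and_assoc]

lemma pvAllZipIdx {α : Type} (m : List α) (k : Nat) (q : α → Bool) :
    (m.zipIdx k).all (fun p => q p.1) = m.all q := by
  induction m generalizing k with
  | nil => rfl
  | cons x t ih => simp [ih]

lemma pvColMem (m : List (List String)) (j : Nat) (x : String) :
    (x ∈ ((List.range m.length).reverse).map (fun k => (m.getD k []).getD j "")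
      ↔ ∃ r ∈ m, x = r.getD j "") := by
  simp only [List.mem_map, List.mem_reverse, List.mem_range]
  constructor
  · rintro ⟨k, hk, rfl⟩
    exact ⟨m[k], List.getElem_mem hk, by rw [List.getD_eq_getElem _ _ hk]⟩
  · rintro ⟨r, hr, rfl⟩
    obtain ⟨k, hk, rfl⟩ := List.mem_iff_getElem.1 hr
    exact ⟨k, hk, by rw [List.getD_eq_getElem _ _ hk]⟩

lemma pvColCond (m : List (List String)) (hm : m ≠ []) (j : Nat) :
    ((PySem.Set.ofList (((List.range m.length).reverse).map (fun k => (m.getD k []).getD j ""))).length == 1)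
      = m.all (fun r => r.getD j "" == (m.headD []).getD j "") := by
  apply Bool.coe_iff_coe.mp
  rw [pvCondA_iff, List.all_eq_true]
  constructor
  · rintro ⟨_, hall⟩
    intro r hr
    rw [beq_iff_eq]
    exact hall _ ((pvColMem m j _).2 ⟨r, hr, rfl⟩) _
      ((pvColMem m j _).2 ⟨m.headD [], pvHeadD_mem m [] hm, rfl⟩)
  · intro hall
    constructor
    · have hl : 0 < m.length := List.length_pos_iff.2 hm
      apply List.ne_nil_of_length_pos
      simpa using hl
    · intro x hx y hy
      obtain ⟨r, hr, rfl⟩ := (pvColMem m j x).1 hx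
      obtain ⟨s, hs, rfl⟩ := (pvColMem m j y).1 hy
      have h1 := beq_iff_eq.1 (hall r hr)
      have h2 := beq_iff_eq.1 (hall s hs)
      rw [h1, h2]

-- ===== VERDICT (by name: the statement is the Claim_ definition above) =====
theorem identify_expansions_spec : Claim_equal_identify_expansions := by
  intro m _ hpre
  obtain ⟨hm, -⟩ := hpre
  unfold Spec_identify_expansions identify_expansions identify_expansions_alt rotate_map_clockwise
  simp only []
  rw [pvFoldlPair
    (fun r (p : Int × List String) =>
      if !p.2.isEmpty && (p.2.count (p.2.headD "") == p.2.length) then r ++ [p.1] else r)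
    (fun u (p : Int × List String) =>
      (List.range (m.headD []).length).map
        (fun j => u.getD j true && (p.2.getD j "" == (m.headD []).getD j "")))]
  refine Prod.ext ?_ ?_
  · -- row expansions
    show (PySem.List.enumerate m 0).foldl
        (fun acc p => if (PySem.Set.ofList p.2).length == 1 then acc ++ [p.1] else acc) [] = _
    rw [pvRowsSpec m (fun l => (PySem.Set.ofList l).length == 1),
      pvRowsSpec m (fun l => !l.isEmpty && (l.count (l.headD "") == l.length))]
    congr 1
    apply List.filter_congr
    intro p _
    exact pvCondA_eq_condB p.1
  · -- column expansions
    show (PySem.List.enumerate _ 0).foldl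
        (fun acc p => if (PySem.Set.ofList p.2).length == 1 then acc ++ [p.1] else acc) [] = _
    rw [pvRowsSpec _ (fun l => (PySem.Set.ofList l).length == 1), pvZipIdxMapRange]
    rw [List.filter_map, List.map_map]
    have hB : ((List.range (m.headD []).length).filter
          (fun j => ((PySem.List.enumerate m 0).foldl
            (fun u (p : Int × List String) =>
              (List.range (m.headD []).length).map
                (fun k => u.getD k true && (p.2.getD k "" == (m.headD []).getD k "")))
            (List.replicate (m.headD []).length true)).getD j true))
        = ((List.range (m.headD []).length).filter
            (fun j => m.all (fun r => r.getD j "" == (m.headD []).getD j ""))) := by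
      apply List.filter_congr
      intro j hj
      rw [List.mem_range] at hj
      rw [pvUnifInv _ _ _ _ j hj, List.getD_replicate _ hj, Bool.true_and,
        PySem.List.enumerate_eq_zipIdx_map, List.all_map]
      simp only [Function.comp_def]
      exact pvAllZipIdx m 0 (fun r => r.getD j "" == (m.headD []).getD j "")
    rw [hB]
    dsimp only [Function.comp_def]
    exact congrArg _ (List.filter_congr (fun j _ => pvColCond m hm j))
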